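-- pv_equiv track=rewrite | github.com/Mister-JP/Agentic-Story-Telling | backend/tests/conftest.py | parse_entry_lines
-- ===== SOURCE A (Python) =====
-- def parse_entry_lines(index_text: str) -> list[str]:
--     """Return the pipe-delimited entry lines from an index file."""
--     in_entries = False
--     lines = []
--     for line in index_text.splitlines():
--         if line.strip() == "## Entries":
--             in_entries = True
--             continue
--         if in_entries and line.startswith("- "):
--             lines.append(line[2:].strip())
--     return lines
-- ===== SOURCE B (Python) =====
-- def parse_entry_lines(index_text: str) -> list[str]:
--     """Return the pipe-delimited entry lines from an index file."""
--     lines = index_text.splitlines()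
--     marker = next((i for i, ln in enumerate(lines) if ln.strip() == "## Entries"), None)
--     if marker is None:
--         return []
--     return [ln[2:].strip() for ln in lines[marker + 1:] if ln.startswith("- ")]
-- ===== Notes on version B (the rewrite author's own statement) =====
-- stated objective: simpler
-- what changed: Replaces the stateful in_entries flag loop by a locate-then-filter decomposition: first locate the marker line, then a single comprehension over the suffix extracts the dash-prefixed entries.
import Mathlib
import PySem

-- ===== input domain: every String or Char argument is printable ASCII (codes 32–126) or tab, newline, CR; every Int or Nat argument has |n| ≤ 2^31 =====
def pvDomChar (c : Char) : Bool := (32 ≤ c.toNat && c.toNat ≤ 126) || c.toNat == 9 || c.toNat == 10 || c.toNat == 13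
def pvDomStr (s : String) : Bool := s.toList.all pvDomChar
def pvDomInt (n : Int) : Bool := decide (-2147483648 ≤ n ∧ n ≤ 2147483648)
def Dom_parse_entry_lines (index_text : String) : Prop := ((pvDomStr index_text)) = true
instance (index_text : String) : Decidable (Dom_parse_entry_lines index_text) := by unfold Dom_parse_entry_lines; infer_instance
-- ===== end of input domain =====

-- B replaces A's stateful in_entries flag loop by a locate-then-filter decomposition (simpler); same return value.

-- ===== PORT A =====
-- the for-loop of A, carrying the in_entries flag and the accumulated list
def pvALoop : List String → Bool → List String → List String
  | [], _, acc => acc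
  | line :: rest, inEntries, acc =>
    if PySem.Str.strip line = "## Entries" then
      pvALoop rest true acc
    else if inEntries && PySem.Str.startswith line "- " then
      pvALoop rest inEntries (acc ++ [PySem.Str.strip (PySem.Str.slice line (some 2) none)])
    else
      pvALoop rest inEntries acc

def parse_entry_lines (index_text : String) : List String :=
  pvALoop (PySem.Str.splitlines index_text) false []

-- ===== PORT B =====
-- phase one of B: index of the first marker line, if any
def pvFindMarker : List String → Option Nat
  | [] => none
  | line :: rest =>
    if PySem.Str.strip line = "## Entries" then some 0
    else (pvFindMarker rest).map (· + 1)

def parse_entry_lines_alt (index_text : String) : List String :=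
  let lines := PySem.Str.splitlines index_text
  match pvFindMarker lines with
  | none => []
  | some i =>
    (lines.drop (i + 1)).filterMap fun ln =>
      if PySem.Str.startswith ln "- " then
        some (PySem.Str.strip (PySem.Str.slice ln (some 2) none))
      else none

-- ===== PRECONDITION & SPEC =====
def Spec_parse_entry_lines (index_text : String) (out : List String) : Prop := out = parse_entry_lines_alt index_text
instance (index_text : String) (out : List String) : Decidable (Spec_parse_entry_lines index_text out) := by unfold Spec_parse_entry_lines; infer_instance

-- ===== CLAIM (what is proved, stated in full; the proofs are below) =====
def Claim_equal_parse_entry_lines : Prop := ∀ (index_text : String), Dom_parse_entry_lines index_text → Spec_parse_entry_lines index_text (parse_entry_lines index_text)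

-- ===== LEMMAS AND PROOFS =====

-- B's filter over a suffix, abbreviated
def pvBFilter (lines : List String) : List String :=
  lines.filterMap fun ln =>
    if PySem.Str.startswith ln "- " then
      some (PySem.Str.strip (PySem.Str.slice ln (some 2) none))
    else none

lemma dropWhile_append_singleton {c : Char} (m : List Char) (hc : PySem.Chars.isspace c = false) :
    ∃ m', List.dropWhile PySem.Chars.isspace (m ++ [c]) = m' ++ [c] := by
  induction m with
  | nil => exact ⟨[], by simp [hc]⟩
  | cons a m ih =>
    by_cases ha : PySem.Chars.isspace a
    · simpa [List.dropWhile, ha] using ih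
    · exact ⟨a :: m, by simp [ha]⟩

lemma strip_cons_nonspace {c : Char} (l : List Char) (hc : PySem.Chars.isspace c = false) :
    ∃ t, PySem.Chars.strip (c :: l) = c :: t := by
  unfold PySem.Chars.strip PySem.Chars.lstrip PySem.Chars.rstrip
  rw [List.dropWhile_cons_of_neg (by simp [hc])]
  obtain ⟨m', hm⟩ := dropWhile_append_singleton l.reverse hc
  refine ⟨m'.reverse, ?_⟩
  simp [hm]

-- a marker line never begins with the dash-space entry prefix
lemma marker_not_dash (ln : String) (h : PySem.Str.strip ln = "## Entries") :
    PySem.Str.startswith ln "- " = false := by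
  by_contra hb
  have hsw : PySem.Str.startswith ln "- " = true := by
    cases hh : PySem.Str.startswith ln "- " with
    | false => exact absurd hh hb
    | true => rfl
  have hp : ("- ".toList) <+: ln.toList := by
    have := (PySem.Chars.startswith_iff ln.toList "- ".toList).mp hsw
    exact this
  obtain ⟨t, ht⟩ := hp
  have ht' : ln.toList = '-' :: ' ' :: t := by simpa using ht.symm
  have hdash : PySem.Chars.isspace '-' = false := by decide
  obtain ⟨u, hu⟩ := strip_cons_nonspace (' ' :: t) hdash
  have hlist : (PySem.Str.strip ln).toList = PySem.Chars.strip ln.toList :=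
    PySem.Str.toList_strip ln
  rw [h, ht', hu] at hlist
  simp at hlist

-- A's loop with the flag on collects exactly B's filter of the remaining lines
lemma aLoop_true (lines : List String) (acc : List String) :
    pvALoop lines true acc = acc ++ pvBFilter lines := by
  induction lines generalizing acc with
  | nil => simp [pvALoop, pvBFilter]
  | cons ln rest ih =>
    by_cases hm : PySem.Str.strip ln = "## Entries"
    · rw [pvALoop, if_pos hm, ih]
      have hnd := marker_not_dash ln hm
      simp only [pvBFilter, List.filterMap_cons, hnd]
      rfl
    · by_cases hd : PySem.Str.startswith ln "- "
      · rw [pvALoop, if_neg hm, if_pos (by rw [hd]; rfl), ih]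
        simp only [pvBFilter, List.filterMap_cons, hd]
        simp
      · have hd' : PySem.Str.startswith ln "- " = false := by
          cases hh : PySem.Str.startswith ln "- " with
          | false => rfl
          | true => exact absurd hh hd
        rw [pvALoop, if_neg hm, if_neg (by rw [hd']; simp), ih]
        simp only [pvBFilter, List.filterMap_cons, hd']
        rfl

-- A's loop with the flag off is B's locate-then-filter
lemma aLoop_false (lines : List String) :
    pvALoop lines false [] =
      match pvFindMarker lines with
      | none => []
      | some i => pvBFilter (lines.drop (i + 1)) := by
  induction lines with
  | nil => simp [pvALoop, pvFindMarker]
  | cons ln rest ih =>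
    by_cases hm : PySem.Str.strip ln = "## Entries"
    · rw [pvALoop, if_pos hm, aLoop_true]
      simp [pvFindMarker, hm]
    · rw [pvALoop, if_neg hm, if_neg (by simp)]
      rw [ih]
      cases hf : pvFindMarker rest with
      | none => simp [pvFindMarker, hm, hf]
      | some i => simp [pvFindMarker, hm, hf]

-- ===== VERDICT (by name: the statement is the Claim_ definition above) =====
theorem parse_entry_lines_spec : Claim_equal_parse_entry_lines := by
  intro s _
  unfold Spec_parse_entry_lines parse_entry_lines parse_entry_lines_alt
  rw [aLoop_false]
  simp only [pvBFilter]
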